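-- pv_equiv track=rewrite | github.com/x522758754/XlsTools | XlsToTxt.py | FormatTxtName
-- ===== SOURCE A (Python) =====
-- def FormatTxtName(name):
-- 	txtName = ''
-- 	arrayString = name.lower().split('_')
-- 	for i in range(len(arrayString)):
-- 		if(len(arrayString[i])):
-- 			if(0 == i):
-- 				txtName = arrayString[i]
-- 			else:
-- 				txtName = txtName + '_' + arrayString[i]
--
-- 	return txtName
-- ===== SOURCE B (Python) =====
-- def FormatTxtName(name):
-- 	out = []
-- 	pending = False
-- 	for ch in name.lower():
-- 		if ch == '_':
-- 			if out:
-- 				pending = True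
-- 		else:
-- 			if pending:
-- 				out.append('_')
-- 				pending = False
-- 			out.append(ch)
-- 	return ''.join(out)
-- ===== Notes on version B (the rewrite author's own statement) =====
-- stated objective: alternative
-- what changed: B replaces split-on-underscore, filter and rebuild with a single character scan that copies characters and emits one separator underscore per interior underscore-run, never materialising a parts list.
-- intended difference: On names that start with an underscore and contain a non-underscore character, A returns the joined parts with one spurious leading underscore (its i==0 test skips the separator only for the first split segment, which is empty there), while B returns the joined non-empty parts with no leading underscore, the intended normalization. — e.g. on FormatTxtName("_a"): A returns "_a", B returns "a"
import Mathlib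
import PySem

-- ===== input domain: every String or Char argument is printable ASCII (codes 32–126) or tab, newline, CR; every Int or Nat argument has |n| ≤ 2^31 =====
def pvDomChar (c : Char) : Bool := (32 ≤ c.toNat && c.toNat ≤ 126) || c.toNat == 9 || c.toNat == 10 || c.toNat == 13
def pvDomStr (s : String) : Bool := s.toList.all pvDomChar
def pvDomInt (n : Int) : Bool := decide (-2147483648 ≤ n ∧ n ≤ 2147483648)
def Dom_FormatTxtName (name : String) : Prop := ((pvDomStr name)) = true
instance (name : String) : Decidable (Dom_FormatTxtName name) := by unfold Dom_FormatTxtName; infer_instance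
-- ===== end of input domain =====

-- B replaces split/filter/rejoin with a single character scan (same task, same O(n) cost); on names that
-- start with '_' and contain a non-underscore character A keeps one spurious leading '_' and B drops it (see D_ below).

-- ===== PORT A =====
-- txtName = ''; arrayString = name.lower().split('_'); for i in range(len(arrayString)): ...
def FormatTxtName (name : String) : String :=
  let arrayString : List String := (PySem.Str.split? (PySem.Str.lower name) "_").getD []
  (PySem.List.pyRange 0 arrayString.length 1).foldl
    (fun txtName i =>
      if PySem.Str.len (PySem.List.pyGetD arrayString i "") ≠ 0 then
        if i = 0 then PySem.List.pyGetD arrayString i ""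
        else txtName ++ "_" ++ PySem.List.pyGetD arrayString i ""
      else txtName) ""

-- ===== PORT B =====
-- single pass over name.lower(): copy characters, remember a pending separator for interior '_'-runs
def FormatTxtName_alt (name : String) : String :=
  let r := (PySem.Str.lower name).toList.foldl
    (fun (st : List Char × Bool) ch =>
      if ch = '_' then
        (if st.1 ≠ [] then (st.1, true) else st)
      else
        ((if st.2 then st.1 ++ ['_'] else st.1) ++ [ch], false))
    ([], false)
  String.ofList r.1

-- ===== PRECONDITION & SPEC =====
-- On names that start with an underscore and contain a non-underscore character, A returns the joined
-- parts with one spurious leading underscore (its `i == 0` test skips the separator only for the first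
-- split segment, which is empty there), while B returns the joined non-empty parts with no leading
-- underscore, the intended normalization.
def D_FormatTxtName (name : String) : Prop :=
  name.toList.head? = some '_' ∧ ∃ c ∈ name.toList, c ≠ '_'
instance (name : String) : Decidable (D_FormatTxtName name) := by unfold D_FormatTxtName; infer_instance

def Spec_FormatTxtName (name : String) (out : String) : Prop := ¬ D_FormatTxtName name → out = FormatTxtName_alt name
instance (name : String) (out : String) : Decidable (Spec_FormatTxtName name out) := by unfold Spec_FormatTxtName; infer_instance

def pvDiffWitness_FormatTxtName : String := "_a"
def pvDiffWitnessOut_FormatTxtName : String × String := ("_a", "a")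

-- ===== CLAIM (what is proved, stated in full; the proofs are below) =====
def Claim_unchanged_FormatTxtName : Prop := ∀ (name : String), Dom_FormatTxtName name → Spec_FormatTxtName name (FormatTxtName name)
def Claim_changed_FormatTxtName : Prop := Dom_FormatTxtName (pvDiffWitness_FormatTxtName) ∧ D_FormatTxtName (pvDiffWitness_FormatTxtName) ∧ FormatTxtName (pvDiffWitness_FormatTxtName) = pvDiffWitnessOut_FormatTxtName.1 ∧ FormatTxtName_alt (pvDiffWitness_FormatTxtName) = pvDiffWitnessOut_FormatTxtName.2 ∧ pvDiffWitnessOut_FormatTxtName.1 ≠ pvDiffWitnessOut_FormatTxtName.2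
def Claim_exact_FormatTxtName : Prop := ∀ (name : String), Dom_FormatTxtName name → D_FormatTxtName name → FormatTxtName name ≠ FormatTxtName_alt name

-- ===== LEMMAS AND PROOFS =====

-- structural split on '_' (proof-side model of Python's split)
def pvSpl : List Char → List (List Char)
  | [] => [[]]
  | c :: cs =>
    if c = '_' then [] :: pvSpl cs
    else
      match pvSpl cs with
      | [] => [[c]]
      | p :: ps => (c :: p) :: ps

-- joined tail parts, each with its leading separator
def pvGlue (ps : List (List Char)) : List Char :=
  (ps.filter (· ≠ [])).flatMap (fun p => '_' :: p)

-- join of the non-empty parts, '_'-separated, no leading separator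
def pvJN (ps : List (List Char)) : List Char :=
  match ps.filter (· ≠ []) with
  | [] => []
  | q :: qs => q ++ qs.flatMap (fun p => '_' :: p)

-- B's continuation functions: out empty / word open / separator pending
mutual
def pvG1 : List Char → List Char
  | [] => []
  | c :: cs => if c = '_' then pvG2 cs else c :: pvG1 cs
def pvG2 : List Char → List Char
  | [] => []
  | c :: cs => if c = '_' then pvG2 cs else '_' :: c :: pvG1 cs
end
def pvG0 : List Char → List Char
  | [] => []
  | c :: cs => if c = '_' then pvG0 cs else c :: pvG1 cs
theorem pvSpl_ne_nil (cs : List Char) : pvSpl cs ≠ [] := by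
  cases cs with
  | nil => simp [pvSpl]
  | cons c cs =>
    simp only [pvSpl]
    split_ifs <;> [simp; skip]
    rcases h : pvSpl cs with _ | ⟨p, ps⟩ <;> simp


theorem pvLowerChar_underscore (c : Char) : (PySem.Chars.lowerChar c = '_') = (c = '_') := by
  unfold PySem.Chars.lowerChar PySem.Chars.isupper
  split_ifs with h
  · simp only [Bool.and_eq_true, decide_eq_true_eq] at h
    have hA : 65 ≤ c.toNat := h.1
    have hZ : c.toNat ≤ 90 := h.2
    have hv : (c.toNat + 32).isValidChar := Or.inl (by omega)
    simp only [eq_iff_iff]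
    constructor
    · intro he
      have h1 := congrArg Char.toNat he
      rw [Char.toNat_ofNat, if_pos hv] at h1
      have h2 : ('_').toNat = 95 := rfl
      omega
    · intro he; subst he
      exact absurd hZ (by decide)
  · simp

theorem pvSplitOn_go (fuel : Nat) : ∀ (l cur : List Char) (acc : List (List Char)),
    l.length < fuel →
    PySem.Chars.splitOn.go ['_'] fuel l cur acc =
      acc.reverse ++ (match pvSpl l with
                      | [] => []
                      | p :: ps => (cur.reverse ++ p) :: ps) := by
  induction fuel with
  | zero => intro l cur acc h; omega
  | succ n ih =>
    intro l cur acc h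
    cases l with
    | nil =>
      rw [PySem.Chars.splitOn.go]
      · simp [pvSpl]
      · omega
    | cons c rest =>
      rw [PySem.Chars.splitOn.go]
      by_cases hc : c = '_'
      · subst hc
        rw [if_pos (by simp [List.isPrefixOf])]
        rw [show List.drop (['_'].length) ('_' :: rest) = rest from rfl]
        rw [ih rest [] (cur.reverse :: acc) (by simpa using Nat.lt_of_succ_lt_succ h)]
        rcases hs : pvSpl rest with _ | ⟨p, ps⟩
        · exact absurd hs (pvSpl_ne_nil rest)
        · simp [pvSpl, hs]
      · rw [if_neg (by simp [List.isPrefixOf]; exact fun hh => hc hh.symm)]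
        rw [ih rest (c :: cur) acc (by simpa using Nat.lt_of_succ_lt_succ h)]
        rcases hs : pvSpl rest with _ | ⟨p, ps⟩
        · exact absurd hs (pvSpl_ne_nil rest)
        · simp [pvSpl, hc, hs]

theorem pvSplitOn_eq (cs : List Char) : PySem.Chars.splitOn cs ['_'] = pvSpl cs := by
  unfold PySem.Chars.splitOn
  rw [pvSplitOn_go (cs.length + 1) cs [] [] (Nat.lt_succ_self _)]
  rcases hs : pvSpl cs with _ | ⟨p, ps⟩
  · exact absurd hs (pvSpl_ne_nil cs)
  · simp

theorem pvArr (name : String) :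
    (PySem.Str.split? (PySem.Str.lower name) "_").getD []
      = (pvSpl (PySem.Chars.lower name.toList)).map String.ofList := by
  have h := PySem.Str.split?_map (PySem.Str.lower name) "_"
  rw [show ("_" : String).toList = ['_'] from rfl] at h
  rw [show (PySem.Str.lower name).toList = PySem.Chars.lower name.toList by
        simp [PySem.Str.toList_lower]] at h
  rw [show PySem.Chars.split? (PySem.Chars.lower name.toList) ['_']
        = some (pvSpl (PySem.Chars.lower name.toList)) by
        simp [PySem.Chars.split?, pvSplitOn_eq]] at h
  rcases hx : PySem.Str.split? (PySem.Str.lower name) "_" with _ | l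
  · rw [hx] at h; simp at h
  · rw [hx] at h
    simp only [Option.map_some, Option.some.injEq] at h
    simp only [Option.getD_some]
    have h2 := congrArg (List.map String.ofList) h
    rw [List.map_map] at h2
    rw [← h2]
    simp [Function.comp_def]

theorem pvTailFold (qs : List (List Char)) : ∀ (acc : String),
    ((qs.map String.ofList).foldl
      (fun a p => if PySem.Str.len p ≠ 0 then a ++ "_" ++ p else a) acc).toList
      = acc.toList ++ pvGlue qs := by
  induction qs with
  | nil => intro acc; simp [pvGlue]
  | cons q qs ih =>
    intro acc
    simp only [List.map_cons, List.foldl_cons]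
    by_cases hq : q = []
    · subst hq
      rw [if_neg (by simp [PySem.Str.len_eq])]
      rw [ih]
      simp [pvGlue]
    · rw [if_pos (by simp [PySem.Str.len_eq, hq])]
      rw [ih]
      simp [pvGlue, hq]

theorem pvAfold (xs : List String) (init : String) :
    List.foldl (fun txtName i =>
        if PySem.Str.len (PySem.List.pyGetD xs i "") ≠ 0 then
          if i = 0 then PySem.List.pyGetD xs i ""
          else txtName ++ "_" ++ PySem.List.pyGetD xs i ""
        else txtName) init (PySem.List.pyRange 1 (xs.length : Int))
      = List.foldl (fun a p => if PySem.Str.len p ≠ 0 then a ++ "_" ++ p else a) init (xs.drop 1) := by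
  have h1 := PySem.List.foldl_congr_mem (PySem.List.pyRange 1 (xs.length : Int))
      (fun txtName i =>
        if PySem.Str.len (PySem.List.pyGetD xs i "") ≠ 0 then
          if i = 0 then PySem.List.pyGetD xs i ""
          else txtName ++ "_" ++ PySem.List.pyGetD xs i ""
        else txtName)
      (fun acc j =>
        if PySem.Str.len (PySem.List.pyGetD xs j "") ≠ 0 then
          acc ++ "_" ++ PySem.List.pyGetD xs j "" else acc)
      init ?hcong
  case hcong =>
    intro acc x hx
    have hx1 : 1 ≤ x := (PySem.List.mem_pyRange_one.mp hx).1
    simp only [show ¬(x = 0) by omega, if_false]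
  rw [h1]
  rw [PySem.List.foldl_pyRange_pyGetD' xs ""
      (fun a p => if PySem.Str.len p ≠ 0 then a ++ "_" ++ p else a) init (by norm_num)]
  norm_num

theorem pvA_toList (name : String) (p0 : List Char) (rest : List (List Char))
    (h : pvSpl (PySem.Chars.lower name.toList) = p0 :: rest) :
    (FormatTxtName name).toList = (if p0 = [] then [] else p0) ++ pvGlue rest := by
  have harr := pvArr name
  rw [h] at harr
  simp only [FormatTxtName, harr]
  have hlen : (0 : Int) < ((List.map String.ofList (p0 :: rest)).length : Int) := by simp
  rw [PySem.List.pyRange_one_cons hlen]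
  simp only [List.foldl_cons, zero_add]
  rw [pvAfold]
  rw [show (List.map String.ofList (p0 :: rest)).drop 1 = List.map String.ofList rest from rfl]
  rw [pvTailFold]
  by_cases hp : p0 = [] <;>
    simp [PySem.List.pyGetD_ofNat', PySem.Str.len_eq, hp]

theorem pvScan (cs : List Char) : ∀ (out : List Char) (pending : Bool),
    (out = [] → pending = false) →
    (cs.foldl
      (fun (st : List Char × Bool) ch =>
        if ch = '_' then
          (if st.1 ≠ [] then (st.1, true) else st)
        else
          ((if st.2 then st.1 ++ ['_'] else st.1) ++ [ch], false))
      (out, pending)).1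
      = out ++ (if out = [] then pvG0 cs else if pending then pvG2 cs else pvG1 cs) := by
  induction cs with
  | nil =>
    intro out pending h
    by_cases ho : out = [] <;> cases pending <;> simp_all [pvG0, pvG1, pvG2]
  | cons c cs ih =>
    intro out pending h
    simp only [List.foldl_cons]
    by_cases hc : c = '_'
    · subst hc
      rw [if_pos rfl]
      by_cases ho : out = []
      · have hp : pending = false := h ho
        subst hp; subst ho
        rw [if_neg (by simp)]
        rw [ih [] false (fun _ => rfl)]
        simp [pvG0]
      · rw [if_pos (by simpa using ho)]
        rw [ih out true (fun he => absurd he ho)]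
        simp only [if_neg ho]
        cases pending <;> simp [pvG1, pvG2, ho]
    · rw [if_neg hc]
      have hne : ((if pending then out ++ ['_'] else out) ++ [c]) ≠ [] := by
        simp
      rw [ih _ false (fun he => absurd he hne)]
      rw [if_neg hne]
      by_cases ho : out = []
      · have hp : pending = false := h ho
        subst hp; subst ho
        simp [pvG0, hc]
      · simp only [if_neg ho]
        cases pending <;> simp [pvG1, pvG2, hc]

theorem pvG_spl (cs : List Char) :
    pvG0 cs = pvJN (pvSpl cs) ∧
    pvG1 cs = (pvSpl cs).headD [] ++ pvGlue (pvSpl cs).tail ∧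
    pvG2 cs = pvGlue (pvSpl cs) := by
  induction cs with
  | nil => refine ⟨?_, ?_, ?_⟩ <;> simp [pvG0, pvG1, pvG2, pvSpl, pvJN, pvGlue]
  | cons c cs ih =>
    obtain ⟨ih0, ih1, ih2⟩ := ih
    by_cases hc : c = '_'
    · subst hc
      have hs : pvSpl ('_' :: cs) = [] :: pvSpl cs := by simp [pvSpl]
      rcases hr : pvSpl cs with _ | ⟨p, ps⟩
      · exact absurd hr (pvSpl_ne_nil cs)
      refine ⟨?_, ?_, ?_⟩
      · rw [show pvG0 ('_' :: cs) = pvG0 cs from by simp [pvG0], ih0, hs, hr]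
        simp [pvJN]
      · rw [show pvG1 ('_' :: cs) = pvG2 cs from by simp [pvG1], ih2, hs, hr]
        simp [pvGlue]
      · rw [show pvG2 ('_' :: cs) = pvG2 cs from by simp [pvG2], ih2, hs, hr]
        simp [pvGlue]
    · rcases hr : pvSpl cs with _ | ⟨p, ps⟩
      · exact absurd hr (pvSpl_ne_nil cs)
      have hs : pvSpl (c :: cs) = (c :: p) :: ps := by simp [pvSpl, hc, hr]
      rw [hr] at ih1
      simp only [List.headD_cons, List.tail_cons] at ih1
      refine ⟨?_, ?_, ?_⟩
      · rw [show pvG0 (c :: cs) = c :: pvG1 cs from by simp [pvG0, hc], ih1, hs]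
        simp [pvJN, pvGlue, List.filter_cons]
      · rw [show pvG1 (c :: cs) = c :: pvG1 cs from by simp [pvG1, hc], ih1, hs]
        simp
      · rw [show pvG2 (c :: cs) = '_' :: c :: pvG1 cs from by simp [pvG2, hc], ih1, hs]
        simp [pvGlue, List.filter_cons]

theorem pvB_toList (name : String) :
    (FormatTxtName_alt name).toList = pvJN (pvSpl (PySem.Chars.lower name.toList)) := by
  simp only [FormatTxtName_alt]
  rw [show (PySem.Str.lower name).toList = PySem.Chars.lower name.toList by
        simp [PySem.Str.toList_lower]]
  rw [String.toList_ofList]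
  rw [pvScan (PySem.Chars.lower name.toList) [] false (fun _ => rfl)]
  simp [(pvG_spl (PySem.Chars.lower name.toList)).1]

theorem pvFilter_nil_iff (cs : List Char) :
    ((pvSpl cs).filter (· ≠ []) = []) ↔ (∀ c ∈ cs, c = '_') := by
  induction cs with
  | nil => simp [pvSpl]
  | cons c cs ih =>
    by_cases hc : c = '_'
    · subst hc
      simp only [List.filter_eq_nil_iff] at ih
      simp [pvSpl]
      simpa using ih
    · rcases hr : pvSpl cs with _ | ⟨p, ps⟩
      · exact absurd hr (pvSpl_ne_nil cs)
      simp [pvSpl, hc, hr, List.filter_cons]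

theorem pvHeadD_nil_of (cs : List Char) (h : cs.head? = some '_') :
    (pvSpl cs).headD [] = [] := by
  cases cs with
  | nil => simp at h
  | cons c cs =>
    simp only [List.head?_cons, Option.some.injEq] at h
    subst h
    simp [pvSpl]

theorem pvHead_of_headD (cs : List Char) (hne : cs ≠ [])
    (h : (pvSpl cs).headD [] = []) : cs.head? = some '_' := by
  cases cs with
  | nil => exact absurd rfl hne
  | cons c cs =>
    by_cases hc : c = '_'
    · simp [hc]
    · rcases hr : pvSpl cs with _ | ⟨p, ps⟩
      · exact absurd hr (pvSpl_ne_nil cs)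
      rw [show pvSpl (c :: cs) = (c :: p) :: ps from by simp [pvSpl, hc, hr]] at h
      simp at h

theorem pvD_iff (name : String) : D_FormatTxtName name ↔
    ((PySem.Chars.lower name.toList).head? = some '_' ∧
     ∃ c ∈ PySem.Chars.lower name.toList, c ≠ '_') := by
  unfold D_FormatTxtName PySem.Chars.lower
  constructor
  · rintro ⟨h1, c, hc, hne⟩
    refine ⟨?_, PySem.Chars.lowerChar c, List.mem_map_of_mem hc, ?_⟩
    · rw [List.head?_map, h1]
      simp [show PySem.Chars.lowerChar '_' = '_' from rfl]
    · intro he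
      exact hne ((pvLowerChar_underscore c) ▸ he)
  · rintro ⟨h1, b, hb, hne⟩
    rw [List.head?_map] at h1
    obtain ⟨c, hc, hbc⟩ := List.mem_map.mp hb
    rcases hh : name.toList.head? with _ | d
    · rw [hh] at h1; simp at h1
    · rw [hh] at h1
      simp only [Option.map_some, Option.some.injEq] at h1
      refine ⟨?_, c, hc, ?_⟩
      · exact congrArg some ((pvLowerChar_underscore d) ▸ h1)
      · intro he
        exact hne (by rw [← hbc, he, show PySem.Chars.lowerChar '_' = '_' from rfl])

theorem FormatTxtName_spec : Claim_unchanged_FormatTxtName := by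
  intro name _ hND
  rcases hs : pvSpl (PySem.Chars.lower name.toList) with _ | ⟨p0, rest⟩
  · exact absurd hs (pvSpl_ne_nil _)
  apply String.toList_inj.mp
  rw [pvA_toList name p0 rest hs, pvB_toList name, hs]
  by_cases hp : p0 = []
  · subst hp
    rw [if_pos rfl]
    by_cases hcs : PySem.Chars.lower name.toList = []
    · rw [hcs] at hs
      simp only [pvSpl] at hs
      obtain ⟨-, hrest⟩ := List.cons.injEq .. ▸ hs
      rw [← hrest]
      simp [pvGlue, pvJN]
    · have hhead : (PySem.Chars.lower name.toList).head? = some '_' :=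
        pvHead_of_headD _ hcs (by rw [hs]; rfl)
      have hall : ∀ c ∈ PySem.Chars.lower name.toList, c = '_' := by
        by_contra hex
        push_neg at hex
        obtain ⟨c, hc, hne⟩ := hex
        exact hND ((pvD_iff name).mpr ⟨hhead, c, hc, hne⟩)
      have hfil := (pvFilter_nil_iff (PySem.Chars.lower name.toList)).mpr hall
      rw [hs] at hfil
      simp at hfil
      have hfil2 : List.filter (fun x => !decide (x = [])) rest = [] := by
        simp only [List.filter_eq_nil_iff]
        intro a ha
        simpa using hfil a ha
      simp [pvGlue, pvJN, hfil2]
  · rw [if_neg hp]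
    simp [pvJN, pvGlue, List.filter_cons, hp]

theorem FormatTxtName_changed : Claim_changed_FormatTxtName := by
  unfold Claim_changed_FormatTxtName
  exact ⟨rfl, ⟨rfl, ⟨'a', by simp [pvDiffWitness_FormatTxtName], by decide⟩⟩, rfl, rfl, by simp [pvDiffWitnessOut_FormatTxtName]⟩
theorem FormatTxtName_tight : Claim_exact_FormatTxtName := by
  intro name _ hD heq
  obtain ⟨hhead, hex⟩ := (pvD_iff name).mp hD
  rcases hs : pvSpl (PySem.Chars.lower name.toList) with _ | ⟨p0, rest⟩
  · exact absurd hs (pvSpl_ne_nil _)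
  have hp0 : p0 = [] := by
    have h2 := pvHeadD_nil_of _ hhead
    rw [hs] at h2
    simpa using h2
  subst hp0
  have hfil : rest.filter (· ≠ []) ≠ [] := by
    intro hf
    obtain ⟨c, hc, hne⟩ := hex
    apply hne
    refine (pvFilter_nil_iff _).mp ?_ c hc
    rw [hs]
    simp only [List.filter_cons]
    simpa using hf
  rcases hq : rest.filter (· ≠ []) with _ | ⟨q, qs⟩
  · exact hfil hq
  have hthis := congrArg String.toList heq
  rw [pvA_toList name [] rest hs, pvB_toList name, hs] at hthis
  simp only [if_pos rfl, List.nil_append] at hthis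
  rw [show pvJN ([] :: rest) = pvJN rest from by simp [pvJN, List.filter_cons]] at hthis
  simp only [pvGlue, pvJN, hq, List.flatMap_cons] at hthis
  exact absurd hthis (by simp)
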